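-- pv_equiv track=rewrite | github.com/ob261ob/esimo_chat_bot | utils.py | extract_region_and_data
-- ===== SOURCE A (Python) =====
-- def extract_region_and_data(input_string):
--     lines = input_string.strip().split("\n")
--
--     region = ""
--     data = ""
--     is_data = False  # flag to know if we are inside a "Data" block
--
--     for line in lines:
--         if line.startswith("Region:"):
--             region = line.split("Region: ", 1)[1].strip()
--         elif line.startswith("Data:"):
--             data = line.split("Data: ", 1)[1].strip()
--             is_data = True  # set the flag to True once we encounter a "Data:" line
--         elif is_data:
--             # if the line does not start with "Data:" but we are inside a "Data" block,
--             # then it is a continuation of the data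
--             data += "\n" + line.strip()
--
--     return region, data
-- ===== SOURCE B (Python) =====
-- def extract_region_and_data(input_string):
--     lines = input_string.strip().split("\n")
--
--     region = ""
--     for line in lines:
--         if line.startswith("Region:"):
--             region = line.split("Region: ", 1)[1].strip()
--
--     last = -1
--     for i, line in enumerate(lines):
--         if line.startswith("Data:"):
--             last = i
--
--     data = ""
--     if last != -1:
--         parts = [lines[last].split("Data: ", 1)[1].strip()] + [
--             line.strip() for line in lines[last + 1:]
--             if not line.startswith("Region:")
--         ]
--         data = "\n".join(parts)
--
--     return region, data
-- ===== Notes on version B (the rewrite author's own statement) =====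
-- stated objective: alternative
-- what changed: Replaces A's single stateful is_data-flag loop by a decomposition: a last-wins pass for region, locating the index of the last 'Data:' line, then slicing the following lines, filtering out 'Region:' lines and joining their stripped payloads with newline.
import Mathlib
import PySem

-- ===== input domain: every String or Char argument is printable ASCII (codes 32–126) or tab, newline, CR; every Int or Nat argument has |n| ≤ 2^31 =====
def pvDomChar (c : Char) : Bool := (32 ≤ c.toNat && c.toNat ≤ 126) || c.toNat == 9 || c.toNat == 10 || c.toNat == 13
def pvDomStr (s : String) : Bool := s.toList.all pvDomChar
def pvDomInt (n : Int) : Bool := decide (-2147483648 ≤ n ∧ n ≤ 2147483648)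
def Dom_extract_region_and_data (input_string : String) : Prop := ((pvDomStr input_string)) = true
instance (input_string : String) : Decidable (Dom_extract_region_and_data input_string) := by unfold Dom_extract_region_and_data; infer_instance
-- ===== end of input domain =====

-- B replaces A's single stateful flag loop by a last-wins region pass plus locate-the-last-'Data:'-line,
-- slice and join (objective: alternative decomposition, same cost).

-- ===== PORT A =====
-- line.startswith("Region:") / line.startswith("Data:")
def pvIsReg (l : String) : Bool := PySem.Str.startswith l "Region:"
def pvIsDat (l : String) : Bool := PySem.Str.startswith l "Data:"

-- l.split(sep, 1)[1] (sep ≠ ""), totalized with "" exactly where Python raises IndexError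
-- (sep absent from l) — those inputs are excluded by Pre_.
def pvPart1 (l sep : String) : String :=
  match PySem.Str.splitMax? l sep 1 with
  | some (_ :: p :: _) => p
  | _ => ""

-- the body of A's for-loop; state = (region, data, is_data)
def pvStepA (st : String × String × Bool) (line : String) : String × String × Bool :=
  if pvIsReg line then
    (PySem.Str.strip (pvPart1 line "Region: "), st.2.1, st.2.2)
  else if pvIsDat line then
    (st.1, PySem.Str.strip (pvPart1 line "Data: "), true)
  else if st.2.2 then
    (st.1, st.2.1 ++ "\n" ++ PySem.Str.strip line, st.2.2)
  else st

def extract_region_and_data (input_string : String) : String × String :=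
  let lines := (PySem.Str.split? (PySem.Str.strip input_string) "\n").getD []
  let st := lines.foldl pvStepA ("", "", false)
  (st.1, st.2.1)

-- ===== PORT B =====
-- body of B's region loop (last 'Region:' line wins)
def pvRegStep (region line : String) : String :=
  if pvIsReg line then PySem.Str.strip (pvPart1 line "Region: ") else region

-- body of B's enumerate loop locating the last 'Data:' line
def pvLastStep (last : Int) (il : Int × String) : Int :=
  if pvIsDat il.2 then il.1 else last

def extract_region_and_data_alt (input_string : String) : String × String :=
  let lines := (PySem.Str.split? (PySem.Str.strip input_string) "\n").getD []
  let region := lines.foldl pvRegStep ""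
  let last := (PySem.List.enumerate lines 0).foldl pvLastStep (-1)
  let data :=
    if last ≠ -1 then
      PySem.Str.join "\n"
        ([PySem.Str.strip (pvPart1 (PySem.List.pyGetD lines last "") "Data: ")] ++
          ((PySem.List.slice lines (some (last + 1)) none).filter
              (fun line => !pvIsReg line)).map PySem.Str.strip)
    else ""
  (region, data)

-- ===== PRECONDITION & SPEC =====
-- Pre_ excludes exactly the inputs on which Python A raises IndexError: a line that starts with
-- "Region:" (resp. "Data:") but does not contain the separator "Region: " (resp. "Data: ").
def Pre_extract_region_and_data (input_string : String) : Prop :=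
  ∀ l ∈ (PySem.Str.split? (PySem.Str.strip input_string) "\n").getD [],
    (PySem.Str.startswith l "Region:" = true → PySem.Str.isIn "Region: " l = true) ∧
    (PySem.Str.startswith l "Data:" = true → PySem.Str.isIn "Data: " l = true)

instance (input_string : String) : Decidable (Pre_extract_region_and_data input_string) := by
  unfold Pre_extract_region_and_data; infer_instance

def pvWitness_extract_region_and_data : String := "Region: EU\nData: t1\nmore data\nRegion: US"

def Spec_extract_region_and_data (input_string : String) (out : String × String) : Prop := out = extract_region_and_data_alt input_string
instance (input_string : String) (out : String × String) : Decidable (Spec_extract_region_and_data input_string out) := by unfold Spec_extract_region_and_data; infer_instance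

-- ===== CLAIM (what is proved, stated in full; the proofs are below) =====
def Claim_equal_extract_region_and_data : Prop := ∀ (input_string : String), Dom_extract_region_and_data input_string → Pre_extract_region_and_data input_string → Spec_extract_region_and_data input_string (extract_region_and_data input_string)

-- ===== LEMMAS AND PROOFS =====

-- index of the LAST line starting with "Data:", as a structural recursion
def pvLastData? : List String → Option Nat
  | [] => none
  | l :: ls =>
    match pvLastData? ls with
    | some n => some (n + 1)
    | none => if pvIsDat l then some 0 else none

-- data accumulation over a suffix that contains no further "Data:" line
def pvBlockStr (ls : List String) (p : String) : String :=
  ls.foldl (fun a l => if pvIsReg l then a else a ++ "\n" ++ PySem.Str.strip l) p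

-- the data component A's fold computes from initial data d and flag b
def pvDataChar (ls : List String) (d : String) (b : Bool) : String :=
  match pvLastData? ls with
  | some n => pvBlockStr (ls.drop (n + 1)) (PySem.Str.strip (pvPart1 (ls.getD n "") "Data: "))
  | none => if b then pvBlockStr ls d else d

lemma pv_not_both (l : String) (h : pvIsReg l = true) : pvIsDat l = false := by
  unfold pvIsReg at h
  unfold pvIsDat
  by_contra hd
  rw [Bool.not_eq_false] at hd
  rw [PySem.Str.startswith_eq, PySem.Chars.startswith_iff] at h hd
  rcases List.prefix_or_prefix_of_prefix h hd with hp | hp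
  · exact absurd hp (by decide)
  · exact absurd hp (by decide)

lemma pv_foldA_char (ls : List String) (r d : String) (b : Bool) :
    ls.foldl pvStepA (r, d, b) =
      (ls.foldl pvRegStep r, pvDataChar ls d b, b || (pvLastData? ls).isSome) := by
  induction ls generalizing r d b with
  | nil => simp [pvDataChar, pvLastData?, pvBlockStr]
  | cons l ls ih =>
    by_cases hR : pvIsReg l = true
    · have hD := pv_not_both l hR
      rw [List.foldl_cons, List.foldl_cons]
      simp only [pvStepA, pvRegStep, hR, if_true]
      rw [ih]
      cases hL : pvLastData? ls with
      | some n => simp [pvDataChar, pvLastData?, hD, hL]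
      | none => simp [pvDataChar, pvLastData?, hD, hL, pvBlockStr, hR]
    · rw [List.foldl_cons, List.foldl_cons]
      by_cases hD : pvIsDat l = true
      · simp only [pvStepA, pvRegStep, hR, hD, if_true, if_false, Bool.false_eq_true]
        rw [ih]
        cases hL : pvLastData? ls with
        | some n => simp [pvDataChar, pvLastData?, hD, hL]
        | none => simp [pvDataChar, pvLastData?, hD, hL]
      · cases hb : b with
        | true =>
          simp only [pvStepA, pvRegStep, hR, hD, Bool.false_eq_true, if_false, if_true]
          rw [ih]
          cases hL : pvLastData? ls with
          | some n => simp [pvDataChar, pvLastData?, hD, hL, hR]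
          | none => simp [pvDataChar, pvLastData?, hD, hL, pvBlockStr, hR]
        | false =>
          simp only [pvStepA, pvRegStep, hR, hD, Bool.false_eq_true, if_false]
          rw [ih]
          cases hL : pvLastData? ls with
          | some n => simp [pvDataChar, pvLastData?, hD, hL, hR]
          | none => simp [pvDataChar, pvLastData?, hD, hL, pvBlockStr, hR]

lemma pv_lastFold (ls : List String) (s acc : Int) :
    (PySem.List.enumerate ls s).foldl pvLastStep acc =
      (pvLastData? ls).elim acc (fun n => s + (n : Int)) := by
  induction ls generalizing s acc with
  | nil => simp [PySem.List.enumerate_nil, pvLastData?]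
  | cons l ls ih =>
    rw [PySem.List.enumerate_cons, List.foldl_cons, ih]
    cases hL : pvLastData? ls with
    | some n =>
      simp [pvLastData?, hL]
      ring
    | none =>
      by_cases hD : pvIsDat l = true <;>
        simp [pvLastData?, hL, hD, pvLastStep]

lemma pv_str_append_assoc (a b c : String) : a ++ b ++ c = a ++ (b ++ c) := by
  rw [← String.toList_inj]
  simp [List.append_assoc]

lemma pv_foldl_prepend (xs : List String) (b a : String) :
    xs.foldl (fun a x => a ++ "\n" ++ x) (b ++ a) = b ++ xs.foldl (fun a x => a ++ "\n" ++ x) a := by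
  induction xs generalizing a with
  | nil => rfl
  | cons y ys ih =>
    rw [List.foldl_cons, List.foldl_cons, pv_str_append_assoc (b ++ a) "\n" y,
      pv_str_append_assoc b a ("\n" ++ y), ← pv_str_append_assoc a "\n" y, ih]

lemma pv_join_fold (xs : List String) (p : String) :
    PySem.Str.join "\n" (p :: xs) = xs.foldl (fun a x => a ++ "\n" ++ x) p := by
  induction xs generalizing p with
  | nil =>
    rw [← String.toList_inj, PySem.Str.toList_join]
    simp [PySem.Chars.join_singleton]
  | cons x xs ih =>
    have hcc : PySem.Str.join "\n" (p :: x :: xs) = p ++ "\n" ++ PySem.Str.join "\n" (x :: xs) := by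
      rw [← String.toList_inj, PySem.Str.toList_join]
      simp [PySem.Chars.join_cons_cons, PySem.Str.toList_join, List.append_assoc]
    rw [hcc, ih, List.foldl_cons, ← pv_foldl_prepend xs (p ++ "\n") x,
      pv_str_append_assoc p "\n" x]

lemma pv_blockStr_filter (ls : List String) (p : String) :
    pvBlockStr ls p =
      ((ls.filter (fun l => !pvIsReg l)).map PySem.Str.strip).foldl
        (fun a x => a ++ "\n" ++ x) p := by
  induction ls generalizing p with
  | nil => rfl
  | cons l ls ih =>
    by_cases hR : pvIsReg l = true
    · simp only [pvBlockStr, List.foldl_cons, List.filter_cons, hR, if_pos, Bool.not_true,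
        Bool.false_eq_true, if_false]
      exact ih p
    · simp only [pvBlockStr, List.foldl_cons, List.filter_cons, hR, Bool.not_eq_true'] at ih ⊢
      simp only [Bool.not_eq_true] at hR
      simp only [hR, Bool.not_false, if_true, if_false, Bool.false_eq_true, List.map_cons,
        List.foldl_cons]
      exact ih (p ++ "\n" ++ PySem.Str.strip l)

-- ===== VERDICT (by name: the statement is the Claim_ definition above) =====
theorem extract_region_and_data_spec : Claim_equal_extract_region_and_data := by
  intro input_string _ _
  unfold Spec_extract_region_and_data
  simp only [extract_region_and_data, extract_region_and_data_alt]
  rw [pv_foldA_char, pv_lastFold]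
  cases hL : pvLastData? ((PySem.Str.split? (PySem.Str.strip input_string) "\n").getD []) with
  | none => simp [pvDataChar, hL]
  | some n =>
    simp only [Option.elim, zero_add]
    rw [if_pos (show ((n : Nat) : Int) ≠ -1 by omega), PySem.List.pyGetD_natCast]
    rw [show ((n : Nat) : Int) + 1 = (((n + 1 : Nat)) : Int) by push_cast; ring]
    rw [PySem.List.slice_from_natCast, List.singleton_append, pv_join_fold,
      ← pv_blockStr_filter]
    simp [pvDataChar, hL]
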